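-- pv_equiv track=rewrite | github.com/bryanpic/propstream-csv-builder | app.py | _score_contacts_columns
-- ===== SOURCE A (Python) =====
-- def _score_contacts_columns(cols: list[str]) -> int:
--     cols_l = [c.lower() for c in cols]
--     score = 0
--     strong_any = [
--         "phone 1", "phone 2", "phone 3", "phone 4", "phone 5",
--         "phone 1 dnc", "email 1", "email 2", "email 3", "email 4",
--     ]
--     score += sum(6 for s in strong_any if s in cols_l)
--     weak_any = [
--         "first name", "last name", "company name",
--         "street address", "mail street address",
--     ]
--     score += sum(2 for s in weak_any if s in cols_l)
--     return score
-- ===== SOURCE B (Python) =====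
-- def _score_contacts_columns(cols: list[str]) -> int:
--     weights = {
--         "phone 1": 6, "phone 2": 6, "phone 3": 6, "phone 4": 6, "phone 5": 6,
--         "phone 1 dnc": 6, "email 1": 6, "email 2": 6, "email 3": 6, "email 4": 6,
--         "first name": 2, "last name": 2, "company name": 2,
--         "street address": 2, "mail street address": 2,
--     }
--     return sum(weights.get(c, 0) for c in {c.lower() for c in cols})
-- ===== Notes on version B (the rewrite author's own statement) =====
-- stated objective: idiomatic
-- what changed: Instead of two passes over fixed target lists each doing a linear membership scan of the lowered columns, B builds one weight dict and sums weights over the deduplicated set of lowered input columns.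
import Mathlib
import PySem

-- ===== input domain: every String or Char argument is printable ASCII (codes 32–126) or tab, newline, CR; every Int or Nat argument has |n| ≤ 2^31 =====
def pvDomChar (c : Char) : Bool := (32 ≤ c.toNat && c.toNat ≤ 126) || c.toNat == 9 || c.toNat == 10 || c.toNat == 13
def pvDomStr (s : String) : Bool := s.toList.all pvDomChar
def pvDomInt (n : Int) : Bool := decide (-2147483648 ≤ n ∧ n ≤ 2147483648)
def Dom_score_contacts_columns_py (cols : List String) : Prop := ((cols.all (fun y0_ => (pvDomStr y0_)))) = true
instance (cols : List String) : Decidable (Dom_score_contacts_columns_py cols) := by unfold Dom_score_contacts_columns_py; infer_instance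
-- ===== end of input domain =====

-- B builds one weight dict and sums weights over the deduplicated set of lowered columns,
-- instead of A's two membership scans over fixed target lists (objective: idiomatic).

-- ===== PORT A =====
def score_contacts_columns_py (cols : List String) : Int :=
  let cols_l := cols.map PySem.Str.lower
  let score : Int := 0
  let strong_any : List String :=
    ["phone 1", "phone 2", "phone 3", "phone 4", "phone 5",
     "phone 1 dnc", "email 1", "email 2", "email 3", "email 4"]
  let score := score + (strong_any.map (fun s => if s ∈ cols_l then (6:Int) else 0)).sum
  let weak_any : List String :=
    ["first name", "last name", "company name",
     "street address", "mail street address"]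
  let score := score + (weak_any.map (fun s => if s ∈ cols_l then (2:Int) else 0)).sum
  score

-- ===== PORT B =====
def pvWeights : PySem.Dict String Int := PySem.Dict.ofList [
  ("phone 1",6),("phone 2",6),("phone 3",6),("phone 4",6),("phone 5",6),
  ("phone 1 dnc",6),("email 1",6),("email 2",6),("email 3",6),("email 4",6),
  ("first name",2),("last name",2),("company name",2),
  ("street address",2),("mail street address",2)]

def score_contacts_columns_py_alt (cols : List String) : Int :=
  ((PySem.Set.ofList (cols.map PySem.Str.lower)).map
    (fun c => PySem.Dict.getD pvWeights c 0)).sum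

-- ===== PRECONDITION & SPEC =====
def Spec_score_contacts_columns_py (cols : List String) (out : Int) : Prop := out = score_contacts_columns_py_alt cols
instance (cols : List String) (out : Int) : Decidable (Spec_score_contacts_columns_py cols out) := by unfold Spec_score_contacts_columns_py; infer_instance

-- ===== CLAIM (what is proved, stated in full; the proofs are below) =====
def Claim_equal_score_contacts_columns_py : Prop := ∀ (cols : List String), Dom_score_contacts_columns_py cols → Spec_score_contacts_columns_py cols (score_contacts_columns_py cols)

-- ===== LEMMAS AND PROOFS =====

-- The sum of weights over any duplicate-free list equals the 15 indicator terms.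
theorem pv_sum_weights (L : List String) (hnd : L.Nodup) :
    (L.map (fun c => PySem.Dict.getD pvWeights c 0)).sum =
      (if "phone 1" ∈ L then (6:Int) else 0) + (if "phone 2" ∈ L then (6:Int) else 0) +
      (if "phone 3" ∈ L then (6:Int) else 0) + (if "phone 4" ∈ L then (6:Int) else 0) +
      (if "phone 5" ∈ L then (6:Int) else 0) + (if "phone 1 dnc" ∈ L then (6:Int) else 0) +
      (if "email 1" ∈ L then (6:Int) else 0) + (if "email 2" ∈ L then (6:Int) else 0) +
      (if "email 3" ∈ L then (6:Int) else 0) + (if "email 4" ∈ L then (6:Int) else 0) +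
      (if "first name" ∈ L then (2:Int) else 0) + (if "last name" ∈ L then (2:Int) else 0) +
      (if "company name" ∈ L then (2:Int) else 0) + (if "street address" ∈ L then (2:Int) else 0) +
      (if "mail street address" ∈ L then (2:Int) else 0) := by
  induction L with
  | nil => simp
  | cons c L ih =>
    obtain ⟨hc, hndL⟩ := List.nodup_cons.mp hnd
    have ih' := ih hndL
    by_cases e1 : "phone 1" = c
    · subst e1
      have hv : PySem.Dict.getD pvWeights "phone 1" 0 = 6 := by decide
      simp_all
      omega
    by_cases e2 : "phone 2" = c
    · subst e2
      have hv : PySem.Dict.getD pvWeights "phone 2" 0 = 6 := by decide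
      simp_all
      omega
    by_cases e3 : "phone 3" = c
    · subst e3
      have hv : PySem.Dict.getD pvWeights "phone 3" 0 = 6 := by decide
      simp_all
      omega
    by_cases e4 : "phone 4" = c
    · subst e4
      have hv : PySem.Dict.getD pvWeights "phone 4" 0 = 6 := by decide
      simp_all
      omega
    by_cases e5 : "phone 5" = c
    · subst e5
      have hv : PySem.Dict.getD pvWeights "phone 5" 0 = 6 := by decide
      simp_all
      omega
    by_cases e6 : "phone 1 dnc" = c
    · subst e6
      have hv : PySem.Dict.getD pvWeights "phone 1 dnc" 0 = 6 := by decide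
      simp_all
      omega
    by_cases e7 : "email 1" = c
    · subst e7
      have hv : PySem.Dict.getD pvWeights "email 1" 0 = 6 := by decide
      simp_all
      omega
    by_cases e8 : "email 2" = c
    · subst e8
      have hv : PySem.Dict.getD pvWeights "email 2" 0 = 6 := by decide
      simp_all
      omega
    by_cases e9 : "email 3" = c
    · subst e9
      have hv : PySem.Dict.getD pvWeights "email 3" 0 = 6 := by decide
      simp_all
      omega
    by_cases e10 : "email 4" = c
    · subst e10
      have hv : PySem.Dict.getD pvWeights "email 4" 0 = 6 := by decide
      simp_all
      omega
    by_cases e11 : "first name" = c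
    · subst e11
      have hv : PySem.Dict.getD pvWeights "first name" 0 = 2 := by decide
      simp_all
      omega
    by_cases e12 : "last name" = c
    · subst e12
      have hv : PySem.Dict.getD pvWeights "last name" 0 = 2 := by decide
      simp_all
      omega
    by_cases e13 : "company name" = c
    · subst e13
      have hv : PySem.Dict.getD pvWeights "company name" 0 = 2 := by decide
      simp_all
      omega
    by_cases e14 : "street address" = c
    · subst e14
      have hv : PySem.Dict.getD pvWeights "street address" 0 = 2 := by decide
      simp_all
      omega
    by_cases e15 : "mail street address" = c
    · subst e15
      have hv : PySem.Dict.getD pvWeights "mail street address" 0 = 2 := by decide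
      simp_all
      omega
    · have hW : pvWeights = PySem.Dict.mk [
        ("phone 1",6),("phone 2",6),("phone 3",6),("phone 4",6),("phone 5",6),
        ("phone 1 dnc",6),("email 1",6),("email 2",6),("email 3",6),("email 4",6),
        ("first name",2),("last name",2),("company name",2),
        ("street address",2),("mail street address",2)] := by decide
      have hc0 : PySem.Dict.getD pvWeights c 0 = 0 := by
        simp [hW, PySem.Dict.getD, PySem.Dict.get?,
          e1,e2,e3,e4,e5,e6,e7,e8,e9,e10,e11,e12,e13,e14,e15]
      simp only [List.map_cons, List.sum_cons, hc0, ih', List.mem_cons]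
      simp [e1,e2,e3,e4,e5,e6,e7,e8,e9,e10,e11,e12,e13,e14,e15]

-- ===== VERDICT (by name: the statement is the Claim_ definition above) =====
theorem score_contacts_columns_py_spec : Claim_equal_score_contacts_columns_py := by
  intro cols _
  unfold Spec_score_contacts_columns_py score_contacts_columns_py score_contacts_columns_py_alt
  rw [pv_sum_weights _ (PySem.Set.nodup_ofList _)]
  simp [PySem.Set.mem_ofList, List.map_cons, List.sum_cons]
  omega
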